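-- pv_equiv track=rewrite | github.com/qqweqwqweqwe/todoapp | 프로그래머스/단계2/메뉴 리뉴얼.py | solution
-- ===== SOURCE A (Python) =====
-- from itertools import combinations
-- from typing import Counter
--
-- def solution(orders, course):
--   answerlist=[]
--   for i in course:
--     countlist=[]
--     for order in orders:
--       order=list(order)
--       order.sort()
--       countlist+=list(combinations(order,i))
--     countlist=Counter(countlist).most_common()
--     if countlist:
--       maxval=countlist[0][1]
--       for i in countlist:
--         answer=""
--         if i[1]==maxval and i[1]>=2:
--           for j in i[0]:
--             answer+=j
--           answerlist.append(answer)
--         else: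
--           break
--   answerlist.sort()
--   return answerlist
-- ===== SOURCE B (Python) =====
-- def solution(orders, course):
--     # Reduce each order once to its character histogram: a sorted list of
--     # (char, multiplicity) pairs.  Combinations are then counted arithmetically:
--     # a sub-multiset drawn from a histogram occurs as product-of-binomials many
--     # index combinations, so duplicate tuples are never enumerated one by one.
--     hists = []
--     for order in orders:
--         h = {}
--         for ch in order:
--             h[ch] = h.get(ch, 0) + 1
--         hists.append([(ch, h[ch]) for ch in sorted(h)])
--
--     def binom(n, k):
--         r = 1
--         for i in range(k):
--             r = r * (n - i) // (i + 1)
--         return r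
--
--     def add_subsets(hist, i, k, prefix, mult, dest):
--         # add every size-k sub-multiset drawn from hist[i:] into dest,
--         # weighted by its number of distinct index combinations
--         if k == 0:
--             dest[prefix] = dest.get(prefix, 0) + mult
--             return
--         if i == len(hist):
--             return
--         ch, m = hist[i]
--         top = m if m < k else k
--         for j in range(top + 1):
--             add_subsets(hist, i + 1, k - j, prefix + ch * j, mult * binom(m, j), dest)
--
--     # the winning combinations of each distinct size, computed once per size
--     table = {}
--     for c in course:
--         if c in table:
--             continue
--         freq = {}
--         for hist in hists:
--             add_subsets(hist, 0, c, "", 1, freq)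
--         winners = []
--         if freq:
--             m = max(freq.values())
--             if m >= 2:
--                 winners = [s for s, v in freq.items() if v == m]
--         table[c] = winners
--     answerlist = []
--     for c in course:
--         answerlist.extend(table[c])
--     answerlist.sort()
--     return answerlist
-- ===== Notes on version B (the rewrite author's own statement) =====
-- stated objective: faster
-- what changed: B never enumerates combination tuples: each order is reduced once to a sorted character histogram, every distinct sub-multiset of a given size is generated once by a recursion over the histogram with its multiplicity computed arithmetically as a product of binomial coefficients, and the winning combinations are computed once per distinct course size and looked up per entry, replacing A's per-entry re-sorting of every order, materialised duplicate tuples and Counter.most_common sort.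
import Mathlib
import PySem

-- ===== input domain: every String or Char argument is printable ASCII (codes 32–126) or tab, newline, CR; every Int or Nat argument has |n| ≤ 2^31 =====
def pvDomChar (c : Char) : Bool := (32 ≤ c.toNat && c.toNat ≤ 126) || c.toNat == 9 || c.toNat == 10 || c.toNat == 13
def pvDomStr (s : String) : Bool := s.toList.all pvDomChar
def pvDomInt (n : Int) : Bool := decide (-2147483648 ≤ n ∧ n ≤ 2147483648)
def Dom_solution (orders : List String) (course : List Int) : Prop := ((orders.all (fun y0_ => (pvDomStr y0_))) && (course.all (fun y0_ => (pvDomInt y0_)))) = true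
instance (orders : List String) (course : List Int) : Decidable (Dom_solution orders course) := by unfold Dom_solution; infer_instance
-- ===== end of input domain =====

-- B reduces each order once to a sorted character histogram and generates every distinct
-- sub-multiset of a given size exactly once, with its multiplicity computed arithmetically as a
-- product of binomial coefficients, instead of A's per-size re-sorting of every order,
-- enumeration of duplicate combination tuples and most_common sort.

-- ===== PORT A =====

-- answer = ""; for j in i[0]: answer += j   (string built on the char-list side)
def aJoin (t : List Char) : String := String.ofList (t.foldl (fun s j => s ++ [j]) [])

-- the inner 'for i in countlist: … else: break' loop of A
def aTake (maxval : Int) (acc : List String) : List (List Char × Int) → List String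
  | [] => acc
  | (t, c) :: rest =>
      if c = maxval ∧ 2 ≤ c then aTake maxval (acc ++ [aJoin t]) rest else acc

def solution (orders : List String) (course : List Int) : List String :=
  let answerlist := course.foldl (fun answerlist i =>
    let countlist : List (List Char) := orders.foldl (fun cl order =>
      cl ++ PySem.List.combinations (PySem.List.sorted order.toList (fun x => x) false) i.toNat) []
    let mc := PySem.List.sorted (PySem.Dict.counter countlist).items (fun p => p.2) true
    match mc with
    | [] => answerlist
    | (_, maxval) :: _ => aTake maxval answerlist mc) []
  PySem.List.sorted answerlist (fun x => x) false

-- ===== PORT B =====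

-- def binom(n, k): r = 1; for i in range(k): r = r * (n - i) // (i + 1); return r
def binomB (n k : Int) : Int :=
  (PySem.List.pyRange 0 k 1).foldl (fun r i => PySem.Int.floordiv (r * (n - i)) (i + 1)) 1

-- add_subsets(hist, i, k, prefix, mult, dest); the hist suffix hist[i:] is the list argument;
-- prefix strings are carried on the char-list side and joined at extraction
def addSubsets (hist : List (Char × Int)) (k : Int) (pre : List Char) (mult : Int)
    (dest : PySem.Dict (List Char) Int) : PySem.Dict (List Char) Int :=
  if k = 0 then dest.modify pre 0 (· + mult)
  else match hist with
    | [] => dest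
    | (ch, m) :: hs =>
        let top := if m < k then m else k
        (PySem.List.pyRange 0 (top + 1) 1).foldl
          (fun d j => addSubsets hs (k - j) (pre ++ List.replicate j.toNat ch) (mult * binomB m j) d)
          dest

-- h = {}; for ch in order: h[ch] = h.get(ch, 0) + 1; [(ch, h[ch]) for ch in sorted(h)]
-- (h[ch] ported as getD: every listed ch is a key of h, so no KeyError)
def histOf (order : String) : List (Char × Int) :=
  let h := order.toList.foldl (fun d ch => d.insert ch (d.getD ch 0 + 1)) PySem.Dict.empty
  (PySem.List.sorted h.keys (fun x => x) false).map (fun ch => (ch, h.getD ch 0))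

def solution_alt (orders : List String) (course : List Int) : List String :=
  let hists := orders.map histOf
  -- table = {}; for c in course: if c in table: continue; … ; table[c] = winners
  let table := course.foldl (fun t c =>
    if t.contains c then t
    else
      let freq := hists.foldl (fun d hist => addSubsets hist c [] 1 d) PySem.Dict.empty
      -- winners = []; 'if freq:' + 'm = max(freq.values())' : max? is some exactly on a nonempty dict
      let winners :=
        match PySem.List.max? freq.values (fun v => v) with
        | none => []
        | some m =>
            if 2 ≤ m then
              (freq.items.filter (fun p => p.2 == m)).map (fun p => String.ofList p.1)
            else []
      t.insert c winners) (PySem.Dict.empty : PySem.Dict Int (List String))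
  let answerlist := course.foldl (fun al c => al ++ table.getD c []) []
  PySem.List.sorted answerlist (fun x => x) false

-- ===== PRECONDITION & SPEC =====
-- Pre_ excludes inputs with a nonempty orders list and a negative course entry: there
-- combinations(order, i) raises ValueError in A, so A returns no value.
def Pre_solution (orders : List String) (course : List Int) : Prop :=
  orders = [] ∨ ∀ i ∈ course, 0 ≤ i
instance (orders : List String) (course : List Int) : Decidable (Pre_solution orders course) := by unfold Pre_solution; infer_instance

def pvWitness_solution : List String × List Int := (["ba", "ab", "c"], [2])

def Spec_solution (orders : List String) (course : List Int) (out : List String) : Prop := out = solution_alt orders course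
instance (orders : List String) (course : List Int) (out : List String) : Decidable (Spec_solution orders course out) := by unfold Spec_solution; infer_instance

-- ===== CLAIM (what is proved, stated in full; the proofs are below) =====
def Claim_equal_solution : Prop := ∀ (orders : List String) (course : List Int), Dom_solution orders course → Pre_solution orders course → Spec_solution orders course (solution orders course)


-- ===== LEMMAS AND PROOFS =====

def leadC (c : Char) (t : List Char) : Nat := (t.takeWhile (· == c)).length

def dropC (c : Char) (t : List Char) : List Char := t.drop (leadC c t)

lemma leadC_nil (c : Char) : leadC c [] = 0 := rfl

lemma dropC_nil (c : Char) : dropC c [] = [] := rfl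

lemma leadC_cons_self (c : Char) (ts : List Char) : leadC c (c :: ts) = leadC c ts + 1 := by
  simp [leadC, List.takeWhile_cons]

lemma dropC_cons_self (c : Char) (ts : List Char) : dropC c (c :: ts) = dropC c ts := by
  simp [dropC, leadC_cons_self, List.drop_succ_cons, leadC]

lemma leadC_cons_ne {c x : Char} (h : x ≠ c) (ts : List Char) : leadC c (x :: ts) = 0 := by
  simp [leadC, List.takeWhile_cons, h]

lemma dropC_cons_ne {c x : Char} (h : x ≠ c) (ts : List Char) : dropC c (x :: ts) = x :: ts := by
  simp [dropC, leadC_cons_ne h]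

lemma count_map_cons_self (L : List (List Char)) (c : Char) (ts : List Char) :
    (L.map (c :: ·)).count (c :: ts) = L.count ts := by
  apply List.count_map_of_injective
  intro a b h
  simpa using h

lemma count_map_cons_ne (L : List (List Char)) {c x : Char} (ts : List Char) (h : x ≠ c) :
    (L.map (c :: ·)).count (x :: ts) = 0 := by
  rw [List.count_eq_zero]
  intro hmem
  obtain ⟨u, _, hu⟩ := List.mem_map.mp hmem
  exact h (by injection hu with h1 _; exact h1.symm)

lemma count_map_cons_nil (L : List (List Char)) (c : Char) :
    (L.map (c :: ·)).count [] = 0 := by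
  rw [List.count_eq_zero]
  intro hmem
  obtain ⟨u, _, hu⟩ := List.mem_map.mp hmem
  cases hu

lemma count_comb_zero_of_mem {c : Char} {rest t : List Char} {k : Nat}
    (hc : c ∉ rest) (ht : c ∈ t) : (PySem.List.combinations rest k).count t = 0 := by
  rw [List.count_eq_zero]
  intro hmem
  exact hc ((PySem.List.sublist_of_mem_combinations hmem).mem ht)

lemma count_comb_run (c : Char) (rest : List Char) (hc : c ∉ rest) :
    ∀ (n k : Nat) (t : List Char),
    (PySem.List.combinations (List.replicate n c ++ rest) k).count t
      = if leadC c t ≤ k ∧ c ∉ dropC c t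
        then n.choose (leadC c t) * (PySem.List.combinations rest (k - leadC c t)).count (dropC c t)
        else 0 := by
  intro n
  induction n with
  | zero =>
      intro k t
      simp only [List.replicate, List.nil_append]
      cases t with
      | nil =>
          rw [if_pos ⟨Nat.zero_le k, by simp [dropC_nil]⟩]
          simp [leadC_nil, dropC_nil]
      | cons x ts =>
          by_cases hx : x = c
          · subst hx
            rw [count_comb_zero_of_mem hc (List.mem_cons_self)]
            rw [leadC_cons_self]
            split
            · simp [Nat.choose_zero_succ]
            · rfl
          · rw [leadC_cons_ne hx, dropC_cons_ne hx]
            by_cases hm : c ∈ x :: ts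
            · rw [count_comb_zero_of_mem hc hm, if_neg (by tauto)]
            · rw [if_pos ⟨Nat.zero_le k, hm⟩]
              simp
  | succ n ih =>
      intro k t
      cases k with
      | zero =>
          rw [PySem.List.combinations_zero]
          cases t with
          | nil =>
              rw [if_pos ⟨by simp [leadC_nil], by simp [dropC_nil]⟩]
              simp [leadC_nil, dropC_nil, PySem.List.combinations_zero]
          | cons x ts =>
              have hcnt : ([([] : List Char)]).count (x :: ts) = 0 := by
                simp [List.count_singleton]
              rw [hcnt]
              by_cases hx : x = c
              · subst hx
                rw [if_neg (by rw [leadC_cons_self]; omega)]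
              · rw [leadC_cons_ne hx, dropC_cons_ne hx]
                split
                · simp [PySem.List.combinations_zero, List.count_singleton]
                · rfl
      | succ k =>
          have hrep : List.replicate (n+1) c ++ rest = c :: (List.replicate n c ++ rest) := by
            simp [List.replicate_succ]
          rw [hrep, PySem.List.combinations_cons_succ, List.count_append]
          cases t with
          | nil =>
              rw [count_map_cons_nil, ih (k+1) []]
              simp only [leadC_nil, dropC_nil, Nat.zero_le, List.not_mem_nil, not_false_iff,
                and_true, if_pos, Nat.sub_zero, Nat.choose_zero_right]
              omega
          | cons x ts =>
              by_cases hx : c = x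
              · subst hx
                rw [count_map_cons_self, ih k ts, ih (k+1) (c :: ts)]
                rw [leadC_cons_self, dropC_cons_self]
                by_cases hg : leadC c ts ≤ k ∧ c ∉ dropC c ts
                · rw [if_pos hg, if_pos ⟨by omega, hg.2⟩, if_pos ⟨by omega, hg.2⟩]
                  have hsub : k + 1 - (leadC c ts + 1) = k - leadC c ts := by omega
                  rw [hsub, Nat.choose_succ_succ]
                  ring
                · have hg2 : ¬(leadC c ts + 1 ≤ k + 1 ∧ c ∉ dropC c ts) :=
                    fun h => hg ⟨by omega, h.2⟩
                  rw [if_neg hg, if_neg hg2, if_neg hg2]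
              · have hx' : x ≠ c := fun h => hx h.symm
                rw [count_map_cons_ne _ _ hx', ih (k+1) (x :: ts)]
                rw [leadC_cons_ne hx', dropC_cons_ne hx']
                split
                · simp
                · rfl

def genN : List (Char × Nat) → Nat → List (List Char × Nat)
  | _, 0 => [([], 1)]
  | [], _ + 1 => []
  | (c, n) :: hs, k + 1 =>
      (List.range (min n (k + 1) + 1)).flatMap (fun j =>
        (genN hs (k + 1 - j)).map (fun p => (List.replicate j c ++ p.1, n.choose j * p.2)))

def SN (l : List (List Char × Nat)) (t : List Char) : Nat :=
  ((l.filter (fun p => p.1 = t)).map (·.2)).sum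

def flattenH (hist : List (Char × Nat)) : List Char :=
  hist.flatMap (fun p => List.replicate p.2 p.1)

lemma genN_keychars {hist : List (Char × Nat)} {k : Nat} {p : List Char × Nat}
    (hp : p ∈ genN hist k) : ∀ ch ∈ p.1, ch ∈ hist.map Prod.fst := by
  induction hist generalizing k p with
  | nil =>
      cases k with
      | zero => simp [genN] at hp; simp [hp]
      | succ k => simp [genN] at hp
  | cons hd hs ih =>
      obtain ⟨c, n⟩ := hd
      cases k with
      | zero => simp [genN] at hp; simp [hp]
      | succ k =>
          simp only [genN, List.mem_flatMap, List.mem_map, List.mem_range] at hp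
          obtain ⟨j, hj, q, hq, rfl⟩ := hp
          intro ch hch
          simp only [List.mem_append, List.mem_replicate] at hch
          rcases hch with ⟨_, rfl⟩ | hch
          · simp
          · simpa using Or.inr (ih hq ch hch)

lemma genN_pos {hist : List (Char × Nat)} {k : Nat} {p : List Char × Nat}
    (hp : p ∈ genN hist k) : 1 ≤ p.2 := by
  induction hist generalizing k p with
  | nil =>
      cases k with
      | zero => simp [genN] at hp; simp [hp]
      | succ k => simp [genN] at hp
  | cons hd hs ih =>
      obtain ⟨c, n⟩ := hd
      cases k with
      | zero => simp [genN] at hp; simp [hp]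
      | succ k =>
          simp only [genN, List.mem_flatMap, List.mem_map, List.mem_range] at hp
          obtain ⟨j, hj, q, hq, rfl⟩ := hp
          have hjn : j ≤ n := by omega
          have := ih hq
          have hc : 1 ≤ n.choose j := Nat.choose_pos hjn
          exact Nat.one_le_iff_ne_zero.mpr (by positivity)

lemma leadC_eq_zero_of_not_mem {c : Char} {u : List Char} (h : c ∉ u) : leadC c u = 0 := by
  cases u with
  | nil => rfl
  | cons x ts =>
      have : x ≠ c := fun hh => h (hh ▸ List.mem_cons_self)
      exact leadC_cons_ne this ts

lemma leadC_repl_append (c : Char) (j : Nat) (u : List Char) (hu : c ∉ u) :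
    leadC c (List.replicate j c ++ u) = j := by
  induction j with
  | zero => simpa using leadC_eq_zero_of_not_mem hu
  | succ j ih => simpa [List.replicate_succ, leadC_cons_self] using ih

lemma dropC_repl_append (c : Char) (j : Nat) (u : List Char) (hu : c ∉ u) :
    dropC c (List.replicate j c ++ u) = u := by
  unfold dropC
  rw [leadC_repl_append c j u hu]
  exact List.drop_left' (by simp)

lemma drop_length_takeWhile (p : Char → Bool) (t : List Char) :
    t.drop ((t.takeWhile p).length) = t.dropWhile p := by
  induction t with
  | nil => rfl
  | cons x ts ih =>
      by_cases h : p x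
      · simpa [List.takeWhile_cons, List.dropWhile_cons, h] using ih
      · simp [List.takeWhile_cons, List.dropWhile_cons, h]

lemma repl_leadC_append_dropC (c : Char) (t : List Char) :
    List.replicate (leadC c t) c ++ dropC c t = t := by
  have h1 : t.takeWhile (· == c) = List.replicate (leadC c t) c := by
    rw [List.eq_replicate_iff]
    refine ⟨rfl, fun x hx => ?_⟩
    have := List.mem_takeWhile_imp hx
    simpa using this
  unfold dropC
  rw [← h1]
  have h2 : leadC c t = (t.takeWhile (· == c)).length := rfl
  rw [h2, drop_length_takeWhile, List.takeWhile_append_dropWhile]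

lemma repl_append_eq_iff {c : Char} {j : Nat} {u t : List Char} (hu : c ∉ u) :
    List.replicate j c ++ u = t ↔ j = leadC c t ∧ u = dropC c t ∧ c ∉ dropC c t := by
  constructor
  · rintro rfl
    exact ⟨(leadC_repl_append c j u hu).symm, (dropC_repl_append c j u hu).symm,
      by rw [dropC_repl_append c j u hu]; exact hu⟩
  · rintro ⟨rfl, rfl, -⟩
    exact repl_leadC_append_dropC c t

lemma SN_append (l1 l2 : List (List Char × Nat)) (t : List Char) :
    SN (l1 ++ l2) t = SN l1 t + SN l2 t := by
  simp [SN, List.filter_append]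

lemma sum_range_single (N j₀ : Nat) (X : Nat) :
    ((List.range N).map (fun j => if j = j₀ then X else 0)).sum = if j₀ < N then X else 0 := by
  induction N with
  | zero => simp
  | succ N ih =>
      rw [List.range_succ, List.map_append, List.sum_append, ih]
      by_cases h : j₀ < N
      · have : N ≠ j₀ := by omega
        simp [h, this, Nat.lt_succ_of_lt h]
      · by_cases h2 : N = j₀
        · subst h2
          simp [h]
        · have : ¬ j₀ < N + 1 := by omega
          simp [h, h2, this]

lemma sum_map_mul_left' (l : List (List Char × Nat)) (w : Nat) :
    (l.map (fun p => w * p.2)).sum = w * (l.map (·.2)).sum := by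
  induction l with
  | nil => simp
  | cons p ps ih => simp [ih, Nat.mul_add]

lemma hcompSnd (c : Char) (j w : Nat) : ((fun x : List Char × Nat => x.2) ∘
    (fun p : List Char × Nat => (List.replicate j c ++ p.1, w * p.2)))
    = (fun p : List Char × Nat => w * p.2) := rfl

lemma SN_map_repl {c : Char} {l : List (List Char × Nat)} (hl : ∀ p ∈ l, c ∉ p.1)
    (j w : Nat) (t : List Char) :
    SN (l.map (fun p => (List.replicate j c ++ p.1, w * p.2))) t
      = if j = leadC c t ∧ c ∉ dropC c t then w * SN l (dropC c t) else 0 := by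
  unfold SN
  rw [List.filter_map]
  by_cases hg : j = leadC c t ∧ c ∉ dropC c t
  · rw [if_pos hg]
    obtain ⟨hj, hnc⟩ := hg
    have hfc : ∀ p ∈ l,
        ((fun q : List Char × Nat => decide (q.1 = t)) ∘
          (fun p : List Char × Nat => (List.replicate j c ++ p.1, w * p.2))) p
          = decide (p.1 = dropC c t) := by
      intro p hp
      simp only [Function.comp_apply, decide_eq_decide]
      rw [repl_append_eq_iff (hl p hp)]
      constructor
      · rintro ⟨-, h2, -⟩; exact h2
      · intro h2; exact ⟨hj, h2, hnc⟩
    rw [List.filter_congr hfc]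
    rw [List.map_map, hcompSnd, sum_map_mul_left']
  · rw [if_neg hg]
    have hfc : ∀ p ∈ l,
        ((fun q : List Char × Nat => decide (q.1 = t)) ∘
          (fun p : List Char × Nat => (List.replicate j c ++ p.1, w * p.2))) p = false := by
      intro p hp
      simp only [Function.comp_apply, decide_eq_false_iff_not]
      rw [repl_append_eq_iff (hl p hp)]
      rintro ⟨h1, -, h3⟩
      exact hg ⟨h1, h3⟩
    rw [List.filter_congr hfc]
    simp

lemma SN_flatMap (f : Nat → List (List Char × Nat)) (xs : List Nat) (t : List Char) :
    SN (xs.flatMap f) t = (xs.map (fun x => SN (f x) t)).sum := by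
  induction xs with
  | nil => rfl
  | cons x rest ih => simp [List.flatMap_cons, SN_append, ih]

lemma mem_flattenH {x : Char} {hs : List (Char × Nat)} (h : x ∈ flattenH hs) :
    x ∈ hs.map Prod.fst := by
  simp only [flattenH, List.mem_flatMap, List.mem_replicate] at h
  obtain ⟨p, hp, _, rfl⟩ := h
  exact List.mem_map.mpr ⟨p, hp, rfl⟩

lemma SN_zero_case (t : List Char) : SN [([], (1:Nat))] t = ([([] : List Char)]).count t := by
  by_cases h : t = []
  · subst h; simp [SN]
  · simp [SN, Ne.symm h, h, List.count_singleton]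
  

lemma core_count : ∀ (histN : List (Char × Nat)),
    ((histN.map Prod.fst).Pairwise (· < ·)) → ∀ (κ : Nat) (t : List Char),
    (PySem.List.combinations (flattenH histN) κ).count t = SN (genN histN κ) t := by
  intro histN
  induction histN with
  | nil =>
      intro _ κ t
      cases κ with
      | zero => rw [PySem.List.combinations_zero, genN, SN_zero_case]
      | succ κ =>
          show (PySem.List.combinations [] (κ+1)).count t = SN (genN [] (κ+1)) t
          rw [PySem.List.combinations_nil_succ, genN]
          rfl
  | cons hd hs ih =>
      obtain ⟨c, n⟩ := hd
      intro hpw κ t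
      have hpw' : (hs.map Prod.fst).Pairwise (· < ·) :=
        (List.pairwise_cons.mp (by simpa using hpw)).2
      have hclt : ∀ y ∈ hs.map Prod.fst, c < y :=
        (List.pairwise_cons.mp (by simpa using hpw)).1
      cases κ with
      | zero => rw [PySem.List.combinations_zero, genN, SN_zero_case]
      | succ κ =>
          have hfl : flattenH ((c,n)::hs) = List.replicate n c ++ flattenH hs := by
            simp [flattenH]
          have hcnotin : c ∉ flattenH hs := fun h => lt_irrefl c (hclt c (mem_flattenH h))
          rw [hfl, count_comb_run c _ hcnotin n (κ+1) t, genN, SN_flatMap]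
          have hterm : ∀ j ∈ List.range (min n (κ+1) + 1),
              SN ((genN hs (κ+1-j)).map
                (fun p => (List.replicate j c ++ p.1, n.choose j * p.2))) t
              = if j = leadC c t ∧ c ∉ dropC c t
                then n.choose j * SN (genN hs (κ+1-j)) (dropC c t) else 0 := by
            intro j _
            exact SN_map_repl
              (fun p hp hmem => lt_irrefl c (hclt c (genN_keychars hp c hmem))) j _ t
          rw [List.map_congr_left hterm]
          set j₀ := leadC c t with hj₀
          by_cases hnc : c ∈ dropC c t
          · rw [if_neg (by tauto)]
            symm
            apply List.sum_eq_zero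
            intro x hx
            obtain ⟨j, _, rfl⟩ := List.mem_map.mp hx
            rw [if_neg (by tauto)]
          · have hX : ∀ j ∈ List.range (min n (κ+1) + 1),
                (if j = j₀ ∧ c ∉ dropC c t
                  then n.choose j * SN (genN hs (κ+1-j)) (dropC c t) else 0)
                = (if j = j₀ then n.choose j₀ * SN (genN hs (κ+1-j₀)) (dropC c t) else 0) := by
              intro j _
              by_cases hj : j = j₀
              · subst hj; simp [hnc]
              · simp [hj]
            rw [List.map_congr_left hX, sum_range_single]
            by_cases h1 : j₀ ≤ min n (κ+1)
            · have hk : j₀ ≤ κ+1 := le_trans h1 (Nat.min_le_right _ _)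
              rw [if_pos (show j₀ < min n (κ+1) + 1 by omega),
                if_pos (show j₀ ≤ κ+1 ∧ c ∉ dropC c t from ⟨hk, hnc⟩),
                ih hpw' (κ+1-j₀) (dropC c t)]
            · rw [if_neg (show ¬ j₀ < min n (κ+1) + 1 by omega)]
              by_cases h2 : j₀ ≤ κ + 1
              · rw [if_pos (show j₀ ≤ κ+1 ∧ c ∉ dropC c t from ⟨h2, hnc⟩)]
                have hn : n < j₀ := by omega
                rw [Nat.choose_eq_zero_of_lt hn, Nat.zero_mul]
              · rw [if_neg (show ¬(j₀ ≤ κ+1 ∧ c ∉ dropC c t) from fun h => h2 h.1)]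

-- histogram of a char list, Nat-side

def histN (l : List Char) : List (Char × Nat) :=
  (PySem.List.sorted (PySem.Set.ofList l) (fun x => x) false).map (fun ch => (ch, l.count ch))

lemma histN_fst (l : List Char) :
    (histN l).map Prod.fst = PySem.List.sorted (PySem.Set.ofList l) (fun x => x) false := by
  simp [histN, List.map_map, Function.comp_def]

lemma histN_pairwise (l : List Char) : ((histN l).map Prod.fst).Pairwise (· < ·) := by
  rw [histN_fst]
  exact PySem.List.sorted_ofList_pairwise_lt l

lemma count_flatten_chars (l : List Char) (cs : List Char) (hnd : cs.Nodup) (x : Char) :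
    (cs.flatMap (fun c => List.replicate (l.count c) c)).count x
      = if x ∈ cs then l.count x else 0 := by
  induction cs with
  | nil => simp
  | cons c cs' ih =>
      have hnd' := (List.nodup_cons.mp hnd).2
      have hcn := (List.nodup_cons.mp hnd).1
      rw [List.flatMap_cons, List.count_append, ih hnd']
      by_cases hx : x = c
      · subst hx
        simp [List.count_replicate, hcn]
      · simp [List.count_replicate, Ne.symm hx, hx]

lemma flattenH_histN_perm (l : List Char) : (flattenH (histN l)).Perm l := by
  rw [List.perm_iff_count]
  intro x
  have : flattenH (histN l)
      = (PySem.List.sorted (PySem.Set.ofList l) (fun x => x) false).flatMap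
          (fun c => List.replicate (l.count c) c) := by
    simp [flattenH, histN, List.flatMap_map]
  rw [this, count_flatten_chars l _ (by
    exact (PySem.List.sorted_perm _ _ _).nodup_iff.mpr (PySem.Set.nodup_ofList l)) x]
  by_cases hx : x ∈ PySem.List.sorted (PySem.Set.ofList l) (fun x => x) false
  · simp [hx]
  · rw [if_neg hx]
    have : x ∉ l := by
      intro hmem
      exact hx ((PySem.List.mem_sorted _ _ _ _).mpr ((PySem.Set.mem_ofList l x).mpr hmem))
    exact (List.count_eq_zero.mpr this).symm

lemma flatten_pairwise_of (hist : List (Char × Nat))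
    (hpw : (hist.map Prod.fst).Pairwise (· < ·)) : (flattenH hist).Pairwise (· ≤ ·) := by
  induction hist with
  | nil => simp [flattenH]
  | cons p hist ih =>
      rw [List.map_cons, List.pairwise_cons] at hpw
      show (List.replicate p.2 p.1 ++ flattenH hist).Pairwise (· ≤ ·)
      apply List.pairwise_append.mpr
      refine ⟨List.pairwise_replicate.mpr (by simp), ih hpw.2, ?_⟩
      intro a ha b hb
      have ha' : a = p.1 := (List.eq_of_mem_replicate ha)
      have hb' : b ∈ (hist.map Prod.fst) := mem_flattenH hb
      subst ha'
      exact le_of_lt (hpw.1 _ hb')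

lemma flattenH_pairwise_le (l : List Char) : (flattenH (histN l)).Pairwise (· ≤ ·) :=
  flatten_pairwise_of _ (histN_pairwise l)

lemma flattenH_histN (l : List Char) :
    PySem.List.sorted l (fun x => x) false = flattenH (histN l) := by
  exact PySem.List.sorted_id_eq_of_perm_of_pairwise l _ (flattenH_histN_perm l) (flattenH_pairwise_le l)

lemma cast_prod (n k : Nat) : (n.choose k : Int) * ((n:Int) - k) = ((n.choose k * (n - k) : Nat) : Int) := by
  by_cases h : k ≤ n
  · push_cast [h]; ring
  · have h' : n < k := by omega
    simp [Nat.choose_eq_zero_of_lt h', Nat.sub_eq_zero_of_le h'.le]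

lemma binomB_eq_choose (n k : Nat) : binomB (n : Int) (k : Int) = (n.choose k : Int) := by
  unfold binomB
  induction k with
  | zero => simp [PySem.List.pyRange_one_eq_nil]
  | succ k ih =>
      have : ((k+1 : Nat) : Int) = (k:Int) + 1 := by push_cast; ring
      rw [this, PySem.List.pyRange_one_succ_right (by positivity), List.foldl_append, ih]
      simp only [List.foldl]
      rw [cast_prod]
      have h1 : ((k:Int) + 1) = ((k+1 : Nat) : Int) := by push_cast; ring
      rw [h1, PySem.Int.floordiv_natCast]
      have h2 : n.choose k * (n - k) = n.choose (k+1) * (k+1) := (Nat.choose_succ_right_eq n k).symm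
      rw [h2, Nat.mul_div_cancel _ (Nat.succ_pos k)]

lemma addSubsets_eq (histN : List (Char × Nat)) (κ : Nat) (pre : List Char) (mult : Int)
    (dest : PySem.Dict (List Char) Int) :
    addSubsets (histN.map (fun p => (p.1, (p.2 : Int)))) (κ : Int) pre mult dest
      = (genN histN κ).foldl (fun d p => d.modify (pre ++ p.1) 0 (· + mult * (p.2 : Int))) dest := by
  induction histN generalizing κ pre mult dest with
  | nil =>
      cases κ with
      | zero => simp [addSubsets, genN]
      | succ κ =>
          rw [addSubsets.eq_def]
          have hne : ((κ:Int) + 1) ≠ 0 := by positivity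
          push_cast
          simp [hne, genN]
  | cons hd hs ih =>
      obtain ⟨c, n⟩ := hd
      cases κ with
      | zero => simp [addSubsets, genN]
      | succ κ =>
          rw [addSubsets.eq_def]
          have hne : ((κ+1 : Nat) : Int) ≠ 0 := by positivity
          rw [if_neg hne]
          simp only [List.map_cons]
          have htop : (if (n:Int) < ((κ+1:Nat):Int) then (n:Int) else ((κ+1:Nat):Int))
              = ((min n (κ+1) : Nat) : Int) := by
            by_cases h : n < κ + 1
            · have h1 : min n (κ+1) = n := Nat.min_eq_left h.le
              rw [h1, if_pos (by push_cast; omega)]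
            · have h2 : min n (κ+1) = κ+1 := Nat.min_eq_right (by omega)
              rw [h2, if_neg (by push_cast; omega)]
          rw [htop]
          have hrange : PySem.List.pyRange 0 (((min n (κ+1) : Nat) : Int) + 1) 1
              = List.map (fun j : Nat => (j : Int)) (List.range (min n (κ+1) + 1)) := by
            have : ((min n (κ+1) : Nat) : Int) + 1 = ((min n (κ+1) + 1 : Nat) : Int) := by push_cast; ring
            rw [this, PySem.List.pyRange_one]
            have h0 : ((((min n (κ+1) + 1 : Nat)):Int) - 0).toNat = min n (κ+1) + 1 := by
              push_cast; omega
            rw [h0]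
            exact List.map_congr_left (fun a _ => by push_cast; ring)
          rw [hrange, List.foldl_map]
          show (List.range (min n (κ+1) + 1)).foldl _ dest = _
          rw [genN, List.foldl_flatMap]
          apply PySem.List.foldl_congr_mem
          intro d j hj
          have hjmem : j ≤ min n (κ+1) := by simpa [Nat.lt_succ_iff] using List.mem_range.mp hj
          have hsub : ((κ+1:Nat):Int) - (j:Int) = ((κ+1-j : Nat) : Int) := by
            have : j ≤ κ + 1 := le_trans hjmem (Nat.min_le_right _ _)
            push_cast [this]; ring
          rw [hsub, binomB_eq_choose, ih]
          rw [List.foldl_map]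
          apply PySem.List.foldl_congr_mem
          intro d' q hq
          have : (j:Int).toNat = j := by simp
          rw [this]
          congr 1
          · simp [List.append_assoc]
          · funext v
            push_cast
            ring

lemma histOf_eq (order : String) :
    histOf order = (histN order.toList).map (fun p => (p.1, (p.2 : Int))) := by
  have hc : (order.toList.foldl (fun d ch => d.insert ch (d.getD ch 0 + 1))
      (PySem.Dict.empty : PySem.Dict Char Int)) = PySem.Dict.counter order.toList :=
    PySem.Dict.foldl_insert_getD_add_one_eq_counter order.toList
  simp only [histOf]
  rw [hc, PySem.Dict.keys_counter]
  unfold histN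
  rw [List.map_map]
  apply List.map_congr_left
  intro ch _
  simp [PySem.Dict.getD_counter]

def freqOf (orders : List String) (c : Int) : PySem.Dict (List Char) Int :=
  (orders.map histOf).foldl (fun d hist => addSubsets hist c [] 1 d) PySem.Dict.empty

-- all (key, weight) contributions B makes for one course entry of size κ

def contribs (orders : List String) (κ : Nat) : List (List Char × Int) :=
  orders.flatMap (fun o => (genN (histN o.toList) κ).map (fun p => (p.1, (p.2 : Int))))

lemma freq_eq (orders : List String) (κ : Nat) :
    freqOf orders (κ : Int)
      = (contribs orders κ).foldl (fun d p => d.modify p.1 0 (· + p.2)) PySem.Dict.empty := by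
  unfold freqOf contribs
  rw [List.foldl_map, List.foldl_flatMap]
  apply PySem.List.foldl_congr_mem
  intro d o _
  rw [histOf_eq, addSubsets_eq, List.foldl_map]
  apply PySem.List.foldl_congr_mem
  intro d' p _
  simp

lemma getD_foldl_modify_addv (l : List (List Char × Int)) (d : PySem.Dict (List Char) Int)
    (t : List Char) :
    (l.foldl (fun d p => d.modify p.1 0 (· + p.2)) d).getD t 0
      = d.getD t 0 + ((l.filter (fun p => p.1 == t)).map (·.2)).sum := by
  induction l generalizing d with
  | nil => simp
  | cons p ps ih =>
      rw [List.foldl_cons, ih]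
      by_cases hp : p.1 = t
      · rw [List.filter_cons_of_pos (by simpa using hp)]
        rw [PySem.Dict.getD_modify]
        simp [hp]
        ring
      · rw [List.filter_cons_of_neg (by simpa using hp)]
        rw [PySem.Dict.getD_modify]
        simp [Ne.symm hp]

lemma sum_cast_snd (l : List (List Char × Nat)) :
    ((l.map (fun p => (p.1, (p.2 : Int)))).map (·.2)).sum = ((l.map (·.2)).sum : Nat) := by
  induction l with
  | nil => rfl
  | cons p ps ih =>
      simp only [List.map_cons, List.sum_cons, ih]
      push_cast
      ring

lemma filter_cast_comm (l : List (List Char × Nat)) (t : List Char) :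
    (l.map (fun p => (p.1, (p.2 : Int)))).filter (fun p => p.1 == t)
      = (l.filter (fun p => p.1 = t)).map (fun p => (p.1, (p.2 : Int))) := by
  rw [List.filter_map]
  refine congrArg _ (List.filter_congr ?_)
  intro p _
  exact beq_eq_decide _ _

lemma SN_contrib (o : String) (κ : Nat) (t : List Char) :
    ((((genN (histN o.toList) κ).map (fun p => (p.1, (p.2 : Int)))).filter
        (fun p => p.1 == t)).map (·.2)).sum
      = ((SN (genN (histN o.toList) κ) t : Nat) : Int) := by
  rw [filter_cast_comm, sum_cast_snd]
  rfl

lemma contribs_sum (orders : List String) (κ : Nat) (t : List Char) :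
    (((contribs orders κ).filter (fun p => p.1 == t)).map (·.2)).sum
      = (((orders.map (fun o => SN (genN (histN o.toList) κ) t)).sum : Nat) : Int) := by
  unfold contribs
  induction orders with
  | nil => rfl
  | cons o os ih =>
      rw [List.flatMap_cons, List.filter_append, List.map_append, List.sum_append,
        List.map_cons, List.sum_cons, SN_contrib, ih]
      push_cast
      ring

lemma getD_freq (orders : List String) (κ : Nat) (t : List Char) :
    (freqOf orders (κ : Int)).getD t 0
      = (((orders.map (fun o => SN (genN (histN o.toList) κ) t)).sum : Nat) : Int) := by
  rw [freq_eq, getD_foldl_modify_addv, PySem.Dict.getD_empty, contribs_sum]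
  ring

def bigListOf (orders : List String) (i : Int) : List (List Char) :=
  orders.foldl (fun cl order =>
    cl ++ PySem.List.combinations (PySem.List.sorted order.toList (fun x => x) false) i.toNat) []

lemma count_bigList (orders : List String) (κ : Nat) (t : List Char) :
    (bigListOf orders (κ : Int)).count t
      = (orders.map (fun o => SN (genN (histN o.toList) κ) t)).sum := by
  unfold bigListOf
  rw [PySem.List.foldl_append_eq_flatMap, List.nil_append]
  induction orders with
  | nil => rfl
  | cons o os ih =>
      rw [List.flatMap_cons, List.count_append, ih, List.map_cons, List.sum_cons]
      have htn : ((κ : Int)).toNat = κ := by omega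
      rw [htn, flattenH_histN, core_count (histN o.toList) (histN_pairwise o.toList) κ t]

lemma nodup_keys_freq (orders : List String) (κ : Nat) :
    (freqOf orders (κ : Int)).keys.Nodup := by
  rw [freq_eq]
  exact PySem.Dict.nodup_keys_foldl_modify_key _ Prod.fst _ _ _ (by simp [PySem.Dict.keys_empty])

lemma keys_freq (orders : List String) (κ : Nat) :
    (freqOf orders (κ : Int)).keys = PySem.Set.ofList ((contribs orders κ).map Prod.fst) := by
  rw [freq_eq]
  rw [PySem.Dict.keys_foldl_modify_key]
  simp [PySem.Dict.keys_empty, PySem.Set.update_nil_left]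

lemma mem_le_SN {l : List (List Char × Nat)} {p : List Char × Nat} (hp : p ∈ l)
    (ht : p.1 = t) : p.2 ≤ SN l t := by
  have : p ∈ l.filter (fun p => p.1 = t) := List.mem_filter.mpr ⟨hp, by simp [ht]⟩
  exact List.le_sum_of_mem (List.mem_map.mpr ⟨p, this, rfl⟩)

lemma SN_pos_iff (l : List (List Char × Nat)) (hpos : ∀ p ∈ l, 1 ≤ p.2) (t : List Char) :
    0 < SN l t ↔ ∃ p ∈ l, p.1 = t := by
  constructor
  · intro h
    by_contra hno
    push_neg at hno
    have : l.filter (fun p => p.1 = t) = [] :=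
      List.filter_eq_nil_iff.mpr (fun p hp => by simpa using hno p hp)
    simp [SN, this] at h
  · rintro ⟨p, hp, ht⟩
    calc 0 < p.2 := hpos p hp
    _ ≤ SN l t := mem_le_SN hp ht

lemma mem_keys_freq_iff (orders : List String) (κ : Nat) (t : List Char) :
    t ∈ (freqOf orders (κ : Int)).keys
      ↔ 0 < (orders.map (fun o => SN (genN (histN o.toList) κ) t)).sum := by
  rw [keys_freq, PySem.Set.mem_ofList]
  constructor
  · intro h
    obtain ⟨p, hp, rfl⟩ := List.mem_map.mp h
    unfold contribs at hp
    obtain ⟨o, ho, hpo⟩ := List.mem_flatMap.mp hp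
    obtain ⟨q, hq, rfl⟩ := List.mem_map.mp hpo
    have h1 : 0 < SN (genN (histN o.toList) κ) q.1 :=
      (SN_pos_iff _ (fun p hp => genN_pos hp) _).mpr ⟨q, hq, rfl⟩
    calc 0 < SN (genN (histN o.toList) κ) q.1 := h1
    _ ≤ _ := List.le_sum_of_mem (List.mem_map.mpr ⟨o, ho, rfl⟩)
  · intro h
    have hex : ∃ o ∈ orders, 0 < SN (genN (histN o.toList) κ) t := by
      by_contra hno
      push_neg at hno
      have hz : ∀ x ∈ orders.map (fun o => SN (genN (histN o.toList) κ) t), x = 0 := by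
        intro x hx
        obtain ⟨o, ho, rfl⟩ := List.mem_map.mp hx
        have := hno o ho
        omega
      rw [List.sum_eq_zero hz] at h
      omega
    obtain ⟨o, ho, hpos⟩ := hex
    obtain ⟨p, hp, ht⟩ := (SN_pos_iff _ (fun p hp => genN_pos hp) _).mp hpos
    apply List.mem_map.mpr
    refine ⟨(p.1, (p.2 : Int)), ?_, by simp [ht]⟩
    unfold contribs
    exact List.mem_flatMap.mpr ⟨o, ho, List.mem_map.mpr ⟨p, hp, rfl⟩⟩

lemma items_perm (orders : List String) (κ : Nat) :
    (PySem.Dict.counter (bigListOf orders (κ : Int))).items.Perm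
      (freqOf orders (κ : Int)).items := by
  have hA := PySem.Dict.items_eq_map_keys (PySem.Dict.counter (bigListOf orders (κ : Int)))
    (PySem.Dict.nodup_keys_counter _) (0 : Int)
  have hB := PySem.Dict.items_eq_map_keys (freqOf orders (κ : Int))
    (nodup_keys_freq orders κ) (0 : Int)
  rw [hA, hB]
  have hgA : ∀ k, (PySem.Dict.counter (bigListOf orders (κ : Int))).getD k 0
      = (((bigListOf orders (κ : Int)).count k : Nat) : Int) := by
    intro k; rw [PySem.Dict.getD_counter]
  have hgB : ∀ k, (freqOf orders (κ : Int)).getD k 0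
      = (((bigListOf orders (κ : Int)).count k : Nat) : Int) := by
    intro k; rw [getD_freq, count_bigList]
  have h1 : (PySem.Dict.counter (bigListOf orders (κ : Int))).keys.map
      (fun k => (k, (PySem.Dict.counter (bigListOf orders (κ : Int))).getD k 0))
      = (PySem.Dict.counter (bigListOf orders (κ : Int))).keys.map
        (fun k => (k, (((bigListOf orders (κ : Int)).count k : Nat) : Int))) :=
    List.map_congr_left (fun k _ => by rw [hgA k])
  have h2 : (freqOf orders (κ : Int)).keys.map
      (fun k => (k, (freqOf orders (κ : Int)).getD k 0))
      = (freqOf orders (κ : Int)).keys.map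
        (fun k => (k, (((bigListOf orders (κ : Int)).count k : Nat) : Int))) :=
    List.map_congr_left (fun k _ => by rw [hgB k])
  rw [h1, h2]
  apply List.Perm.map
  apply (List.perm_ext_iff_of_nodup (PySem.Dict.nodup_keys_counter _) (nodup_keys_freq orders κ)).mpr
  intro t
  rw [mem_keys_freq_iff, ← count_bigList, PySem.Dict.keys_counter, PySem.Set.mem_ofList]
  exact List.count_pos_iff.symm

def winA (orders : List String) (i : Int) : List String :=
  match PySem.List.sorted (PySem.Dict.counter (bigListOf orders i)).items (fun p => p.2) true with
  | [] => []
  | mc@((_, mv) :: _) =>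
      (mc.takeWhile (fun p => decide (p.2 = mv) && decide (2 ≤ p.2))).map (fun p => aJoin p.1)

def winB (orders : List String) (c : Int) : List String :=
  match PySem.List.max? (freqOf orders c).values (fun v => v) with
  | none => []
  | some m =>
      if 2 ≤ m then
        ((freqOf orders c).items.filter (fun p => p.2 == m)).map (fun p => String.ofList p.1)
      else []

lemma aJoin_eq (t : List Char) : aJoin t = String.ofList t := by
  unfold aJoin
  rw [PySem.List.foldl_append_singleton, List.nil_append]

lemma aTake_eq (m : Int) (l : List (List Char × Int)) : ∀ acc,
    aTake m acc l
      = acc ++ (l.takeWhile (fun p => decide (p.2 = m) && decide (2 ≤ p.2))).map (fun p => aJoin p.1) := by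
  induction l with
  | nil => intro acc; simp [aTake]
  | cons p rest ih =>
      intro acc
      obtain ⟨t, cnt⟩ := p
      by_cases h : cnt = m ∧ 2 ≤ cnt
      · obtain ⟨h1, h2⟩ := h
        subst h1
        simp [aTake, h2, ih]
      · have hb : (decide (cnt = m) && decide (2 ≤ cnt)) = false := by
          simp only [Bool.and_eq_false_iff, decide_eq_false_iff_not]; tauto
        simp [aTake, h, hb]

lemma takeWhile_eq_filter_of_desc {κ : Type} (m : Int) (l : List (κ × Int))
    (hle : ∀ p ∈ l, p.2 ≤ m) (hpw : l.Pairwise (fun a b => b.2 ≤ a.2)) (hm : 2 ≤ m) :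
    l.takeWhile (fun p => decide (p.2 = m) && decide (2 ≤ p.2)) = l.filter (fun p => p.2 == m) := by
  induction l with
  | nil => rfl
  | cons p rest ih =>
      obtain ⟨hrest, hpw'⟩ := List.pairwise_cons.mp hpw
      obtain ⟨t, cnt⟩ := p
      by_cases h : cnt = m
      · subst h
        simp [hm, ih (fun q hq => hle q (by simp [hq])) hpw']
      · have hlt : cnt < m := lt_of_le_of_ne (hle (t, cnt) (by simp)) h
        have hfil : rest.filter (fun p => p.2 == m) = [] :=
          List.filter_eq_nil_iff.mpr (fun q hq => by
            have := hrest q hq; simp only [beq_iff_eq]; omega)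
        simp [h, hfil]

lemma takeWhile_eq_nil_of_lt_two {κ : Type} (m : Int) (hm : ¬ 2 ≤ m) (l : List (κ × Int)) :
    l.takeWhile (fun p => decide (p.2 = m) && decide (2 ≤ p.2)) = [] := by
  cases l with
  | nil => rfl
  | cons p rest =>
      have hb : (decide (p.2 = m) && decide (2 ≤ p.2)) = false := by
        by_cases h : p.2 = m
        · subst h; simp [hm]
        · simp [h]
      simp [hb]

lemma win_perm (orders : List String) (κ : Nat) :
    (winA orders (κ : Int)).Perm (winB orders (κ : Int)) := by
  have hitems := items_perm orders κ
  unfold winA winB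
  have hvals : (freqOf orders (κ : Int)).values = (freqOf orders (κ : Int)).items.map (·.2) := rfl
  cases hmc : PySem.List.sorted (PySem.Dict.counter (bigListOf orders (κ : Int))).items
      (fun p => p.2) true with
  | nil =>
      have hitemsA : (PySem.Dict.counter (bigListOf orders (κ : Int))).items = [] :=
        (PySem.List.sorted_eq_nil_iff _ _ _).mp hmc
      have hitemsB : (freqOf orders (κ : Int)).items = [] :=
        List.Perm.eq_nil (hitemsA ▸ hitems).symm
      rw [hvals, hitemsB]
      simp [PySem.List.max?]
  | cons hd tl =>
      obtain ⟨k, mv⟩ := hd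
      have hitemsA_ne : (PySem.Dict.counter (bigListOf orders (κ : Int))).items ≠ [] := by
        intro hh
        rw [(PySem.List.sorted_eq_nil_iff _ _ _).mpr hh] at hmc
        cases hmc
      have hitemsB_ne : (freqOf orders (κ : Int)).items ≠ [] := by
        intro hh
        exact hitemsA_ne (List.Perm.eq_nil (hh ▸ hitems))
      have hvals_ne : (freqOf orders (κ : Int)).values ≠ [] := by
        rw [hvals]; simpa using hitemsB_ne
      obtain ⟨m, hm⟩ : ∃ m, PySem.List.max? (freqOf orders (κ : Int)).values (fun v => v) = some m := by
        cases hmax : PySem.List.max? (freqOf orders (κ : Int)).values (fun v => v) with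
        | none => exact absurd ((PySem.List.max?_eq_none_iff _ _).mp hmax) hvals_ne
        | some m => exact ⟨m, rfl⟩
      have hub : ∀ y ∈ (PySem.Dict.counter (bigListOf orders (κ : Int))).items, y.2 ≤ mv :=
        PySem.List.key_head_sorted_rev_ge _ _ hmc
      have hmmv : m = mv := by
        have h1 : mv ≤ m := by
          have hkmem : (k, mv) ∈ (PySem.Dict.counter (bigListOf orders (κ : Int))).items := by
            have : (k, mv) ∈ PySem.List.sorted
                (PySem.Dict.counter (bigListOf orders (κ : Int))).items (fun p => p.2) true := by
              rw [hmc]; simp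
            exact (PySem.List.mem_sorted _ _ _ _).mp this
          have : mv ∈ (freqOf orders (κ : Int)).values := by
            rw [hvals]
            exact List.mem_map.mpr ⟨(k, mv), hitems.mem_iff.mp hkmem, rfl⟩
          exact PySem.List.max?_isMax hm _ this
        have h2 : m ≤ mv := by
          have hmmem : m ∈ (freqOf orders (κ : Int)).values := PySem.List.max?_mem hm
          rw [hvals] at hmmem
          obtain ⟨p, hp, hp2⟩ := List.mem_map.mp hmmem
          exact hp2 ▸ hub p (hitems.mem_iff.mpr hp)
        omega
      rw [hm, hmmv]
      by_cases h2 : 2 ≤ mv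
      · simp only [if_pos h2]
        have hperm : (PySem.List.sorted
            (PySem.Dict.counter (bigListOf orders (κ : Int))).items (fun p => p.2) true).Perm
            (PySem.Dict.counter (bigListOf orders (κ : Int))).items := PySem.List.sorted_perm _ _ _
        have hle : ∀ p ∈ PySem.List.sorted
            (PySem.Dict.counter (bigListOf orders (κ : Int))).items (fun p => p.2) true, p.2 ≤ mv :=
          fun p hp => hub p ((PySem.List.mem_sorted _ _ _ _).mp hp)
        have hpw := PySem.List.sorted_pairwise_rev
          (PySem.Dict.counter (bigListOf orders (κ : Int))).items (fun p => p.2)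
        rw [← hmc, takeWhile_eq_filter_of_desc mv _ hle hpw h2]
        have := (((hperm.trans hitems).filter (fun p => p.2 == mv)).map (fun p => aJoin p.1))
        have heq : ((freqOf orders (κ : Int)).items.filter (fun p => p.2 == mv)).map
              (fun p => aJoin p.1)
            = ((freqOf orders (κ : Int)).items.filter (fun p => p.2 == mv)).map
              (fun p => String.ofList p.1) :=
          List.map_congr_left (fun p _ => aJoin_eq p.1)
        rw [heq] at this
        exact this
      · simp only [if_neg h2]
        rw [← hmc, takeWhile_eq_nil_of_lt_two mv h2]
        rfl

lemma foldl_append_perm {β : Type} (l : List β) (f g : β → List String)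
    (h : ∀ x ∈ l, (f x).Perm (g x)) :
    ∀ acc1 acc2 : List String, acc1.Perm acc2 →
    (l.foldl (fun acc x => acc ++ f x) acc1).Perm (l.foldl (fun acc x => acc ++ g x) acc2) := by
  induction l with
  | nil => intro a b hp; exact hp
  | cons x rest ih =>
      intro a b hp
      exact ih (fun y hy => h y (by simp [hy])) _ _ (hp.append (h x (by simp)))

lemma solution_eq_winA (orders : List String) (course : List Int) :
    solution orders course
      = PySem.List.sorted (course.foldl (fun acc i => acc ++ winA orders i) []) (fun x => x) false := by
  unfold solution
  dsimp only
  congr 1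
  apply PySem.List.foldl_congr_mem
  intro acc i _
  show (match PySem.List.sorted (PySem.Dict.counter (bigListOf orders i)).items (fun p => p.2) true with
    | [] => acc
    | (_, maxval) :: _ => aTake maxval acc
        (PySem.List.sorted (PySem.Dict.counter (bigListOf orders i)).items (fun p => p.2) true))
    = acc ++ winA orders i
  unfold winA
  cases hmc : PySem.List.sorted (PySem.Dict.counter (bigListOf orders i)).items (fun p => p.2) true with
  | nil => simp
  | cons hd tl =>
      obtain ⟨k, mv⟩ := hd
      dsimp only
      rw [aTake_eq]

lemma contains_foldl_step (orders : List String) (course : List Int)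
    (t : PySem.Dict Int (List String)) (k : Int) (hk : t.contains k = true) :
    (course.foldl (fun t c => if t.contains c then t
      else t.insert c (winB orders c)) t).contains k = true := by
  induction course generalizing t with
  | nil => exact hk
  | cons c cs ih =>
      rw [List.foldl_cons]
      apply ih
      by_cases hc : t.contains c
      · simpa [hc] using hk
      · rw [if_neg hc, PySem.Dict.contains_insert, hk, Bool.or_true]

lemma tableOf_spec (orders : List String) (course : List Int) :
    ∀ t : PySem.Dict Int (List String),
    (∀ k, t.contains k = true → t.getD k [] = winB orders k) →
    (∀ k, (course.foldl (fun t c => if t.contains c then t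
        else t.insert c (winB orders c)) t).contains k = true →
      (course.foldl (fun t c => if t.contains c then t
        else t.insert c (winB orders c)) t).getD k [] = winB orders k)
    ∧ ∀ c ∈ course, (course.foldl (fun t c => if t.contains c then t
        else t.insert c (winB orders c)) t).contains c = true := by
  induction course with
  | nil => intro t ht; exact ⟨ht, by simp⟩
  | cons c cs ih =>
      intro t ht
      rw [List.foldl_cons]
      by_cases hc : t.contains c
      · rw [if_pos hc]
        refine ⟨(ih t ht).1, fun c' hc' => ?_⟩
        rcases List.mem_cons.mp hc' with rfl | hmem
        · exact contains_foldl_step orders cs t c' hc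
        · exact (ih t ht).2 c' hmem
      · rw [if_neg hc]
        have ht' : ∀ k, (t.insert c (winB orders c)).contains k = true →
            (t.insert c (winB orders c)).getD k [] = winB orders k := by
          intro k hk
          by_cases hkc : k = c
          · subst hkc
            rw [PySem.Dict.getD_insert_self]
          · rw [PySem.Dict.getD_insert_of_ne _ _ _ hkc]
            rw [PySem.Dict.contains_insert] at hk
            apply ht
            simpa [hkc] using hk
        refine ⟨(ih _ ht').1, fun c' hc' => ?_⟩
        rcases List.mem_cons.mp hc' with rfl | hmem
        · exact contains_foldl_step orders cs _ c'
            (by simp [PySem.Dict.contains_insert])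
        · exact (ih _ ht').2 c' hmem

lemma solution_alt_eq_winB (orders : List String) (course : List Int) :
    solution_alt orders course
      = PySem.List.sorted (course.foldl (fun acc c => acc ++ winB orders c) []) (fun x => x) false := by
  show PySem.List.sorted
      (course.foldl (fun al c => al ++ (course.foldl (fun t c => if t.contains c then t
        else t.insert c (winB orders c)) PySem.Dict.empty).getD c []) [])
      (fun x => x) false = _
  congr 1
  apply PySem.List.foldl_congr_mem
  intro al c hc
  have hspec := tableOf_spec orders course PySem.Dict.empty
    (fun k hk => by simp [PySem.Dict.contains_empty] at hk)
  rw [hspec.1 c (hspec.2 c hc)]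

lemma win_empty (c : Int) : winA [] c = [] ∧ winB [] c = [] := by
  constructor
  · rfl
  · rfl

-- ===== VERDICT (by name: the statement is the Claim_ definition above) =====
theorem solution_spec : Claim_equal_solution := by
  intro orders course _ hpre
  unfold Spec_solution
  rw [solution_eq_winA, solution_alt_eq_winB]
  apply (PySem.List.sorted_id_eq_sorted_id_iff_perm _ _).mpr
  apply foldl_append_perm course _ _ ?_ [] [] (List.Perm.refl [])
  intro c hc
  rcases hpre with rfl | hall
  · rw [(win_empty c).1, (win_empty c).2]
  · have h0 : 0 ≤ c := hall c hc
    have hcast : c = ((c.toNat : Nat) : Int) := by omega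
    rw [hcast]
    exact win_perm orders c.toNat
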